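-- pv_equiv track=rewrite | github.com/romeorizzi/portafoglioVoti_public | Algoritmi/2024-02-08/vostre_sottomissioni/odd_cycle_reach/VR489524/sub1.py | checkOddCycle
-- ===== SOURCE A (Python) =====
-- def checkOddCycle(lista_nodi):
--
--     counter = 0
--     j = -1
--     odd_list = []
--
--     for i in range(len(lista_nodi)):
--         if len(lista_nodi[i]) > 0:
--
--             if(counter == 0):
--                 odd_list.append(i)
--
--             counter = counter + 1
--
--             odd_list.append(lista_nodi[i][0])
--         else:
--             counter = 0
--
--     if counter % 2 != 0:
--
--         return odd_list
--     else:
--         return []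
-- ===== SOURCE B (Python) =====
-- def checkOddCycle(lista_nodi):
--     # Phase 1: collect maximal runs of nodes with non-empty adjacency lists,
--     # each as (start_index, list of first neighbours).
--     runs = []
--     i = 0
--     n = len(lista_nodi)
--     while i < n:
--         if lista_nodi[i]:
--             heads = []
--             j = i
--             while j < n and lista_nodi[j]:
--                 heads.append(lista_nodi[j][0])
--                 j += 1
--             runs.append((i, heads))
--             i = j
--         else:
--             i += 1
--     # Phase 2: the list is kept only when the final run reaches the end of
--     # the input and has odd length; otherwise the answer is [].
--     if not runs:
--         return []
--     s, heads = runs[-1]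
--     if s + len(heads) == n and len(heads) % 2 == 1:
--         out = []
--         for start, hs in runs:
--             out.append(start)
--             out.extend(hs)
--         return out
--     return []
-- ===== Notes on version B (the rewrite author's own statement) =====
-- stated objective: alternative
-- what changed: Replaces A's single-pass counter/flag state machine with a two-phase runs decomposition: first collect maximal runs of non-empty adjacency lists as (start index, heads), then decide from the last run whether it reaches the end with odd length and, if so, flatten all runs into the answer.
import Mathlib
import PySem

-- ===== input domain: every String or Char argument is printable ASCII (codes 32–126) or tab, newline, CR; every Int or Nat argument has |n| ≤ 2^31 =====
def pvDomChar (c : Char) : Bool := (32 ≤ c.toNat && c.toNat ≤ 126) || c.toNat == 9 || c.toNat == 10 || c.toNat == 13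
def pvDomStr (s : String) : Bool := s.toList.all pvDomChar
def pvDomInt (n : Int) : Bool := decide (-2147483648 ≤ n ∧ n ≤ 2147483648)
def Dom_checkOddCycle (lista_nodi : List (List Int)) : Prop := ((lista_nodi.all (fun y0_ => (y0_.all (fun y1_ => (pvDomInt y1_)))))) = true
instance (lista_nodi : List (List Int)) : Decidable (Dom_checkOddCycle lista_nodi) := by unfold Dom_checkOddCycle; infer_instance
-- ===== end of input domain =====

-- B replaces A's single-pass counter state machine by a two-phase runs decomposition
-- (collect maximal non-empty runs, then decide from the last run); alternative, same cost.

-- ===== PORT A =====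
-- loop body of A's for-loop; state = (counter, odd_list); the Python's 'j = -1' is dead and omitted
def pvStepA (st : Int × List Int) (p : Int × List Int) : Int × List Int :=
  if 0 < p.2.length then
    (st.1 + 1, (if st.1 = 0 then st.2 ++ [p.1] else st.2) ++ [p.2.headD 0])  -- x[0]: branch guarantees non-empty, headD exact
  else (0, st.2)

def checkOddCycle (lista_nodi : List (List Int)) : List Int :=
  let st := (PySem.List.enumerate lista_nodi).foldl pvStepA ((0:Int), ([] : List Int))
  if st.1 % 2 ≠ 0 then st.2 else []

-- ===== PORT B =====
-- inner while loop of phase 1: first neighbours of the leading run of non-empty lists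
def pvRunHeads : List (List Int) → List Int
  | [] => []
  | x :: xs => if x = [] then [] else x.headD 0 :: pvRunHeads xs  -- lista_nodi[j][0]: j inside the run, non-empty

-- what remains after the leading run of non-empty lists
def pvAfterRun : List (List Int) → List (List Int)
  | [] => []
  | x :: xs => if x = [] then x :: xs else pvAfterRun xs

theorem pvAfterRun_length_le : ∀ l : List (List Int), (pvAfterRun l).length ≤ l.length
  | [] => le_refl _
  | x :: xs => by
      unfold pvAfterRun
      split
      · exact le_refl _
      · exact le_trans (pvAfterRun_length_le xs) (Nat.le_succ _)

-- outer while loop of phase 1: list of (start index, heads) for each maximal run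
def pvRunsB : List (List Int) → Int → List (Int × List Int)
  | [], _ => []
  | x :: xs, i =>
    if x = [] then pvRunsB xs (i+1)
    else (i, x.headD 0 :: pvRunHeads xs) ::
         pvRunsB (pvAfterRun xs) (i + 1 + (pvRunHeads xs).length)
termination_by l _ => l.length
decreasing_by
  · simp
  · exact Nat.lt_succ_of_le (pvAfterRun_length_le xs)

def checkOddCycle_alt (lista_nodi : List (List Int)) : List Int :=
  let runs := pvRunsB lista_nodi 0
  match runs.getLast? with
  | none => []
  | some (s, heads) =>
    if s + (heads.length : Int) = (lista_nodi.length : Int) ∧ heads.length % 2 = 1 then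
      runs.foldl (fun acc (p : Int × List Int) => acc ++ p.1 :: p.2) []
    else []

-- ===== PRECONDITION & SPEC =====
def Spec_checkOddCycle (lista_nodi : List (List Int)) (out : List Int) : Prop := out = checkOddCycle_alt lista_nodi
instance (lista_nodi : List (List Int)) (out : List Int) : Decidable (Spec_checkOddCycle lista_nodi out) := by unfold Spec_checkOddCycle; infer_instance

-- ===== CLAIM (what is proved, stated in full; the proofs are below) =====
def Claim_equal_checkOddCycle : Prop := ∀ (lista_nodi : List (List Int)), Dom_checkOddCycle lista_nodi → Spec_checkOddCycle lista_nodi (checkOddCycle lista_nodi)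

-- ===== LEMMAS AND PROOFS =====

-- every adjacency list non-empty
def pvAllNE : List (List Int) → Bool
  | [] => true
  | x :: xs => if x = [] then false else pvAllNE xs

-- length of the trailing run of non-empty lists
def pvTrailC : List (List Int) → Int
  | [] => 0
  | x :: xs => if x ≠ [] ∧ pvAllNE xs = true then (xs.length : Int) + 1 else pvTrailC xs

def pvEmit (rs : List (Int × List Int)) : List Int := rs.flatMap (fun p => p.1 :: p.2)

-- emission of the remaining input when the loop is inside a run
def pvEmitIn : List (List Int) → Int → List Int
  | [], _ => []
  | x :: xs, i => if x = [] then pvEmit (pvRunsB xs (i+1)) else x.headD 0 :: pvEmitIn xs (i+1)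

theorem pvAllNE_cons (x : List Int) (xs : List (List Int)) :
    pvAllNE (x :: xs) = if x = [] then false else pvAllNE xs := by rw [pvAllNE]

theorem pvTrailC_cons (x : List Int) (xs : List (List Int)) :
    pvTrailC (x :: xs) = if x ≠ [] ∧ pvAllNE xs = true then (xs.length : Int) + 1 else pvTrailC xs := by
  rw [pvTrailC]

theorem pvEmitIn_cons (x : List Int) (xs : List (List Int)) (i : Int) :
    pvEmitIn (x :: xs) i = if x = [] then pvEmit (pvRunsB xs (i+1)) else x.headD 0 :: pvEmitIn xs (i+1) := by
  rw [pvEmitIn]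

theorem pvAllNE_trailC : ∀ l : List (List Int), pvAllNE l = true → pvTrailC l = (l.length : Int) := by
  intro l h
  induction l with
  | nil => simp [pvTrailC]
  | cons x xs ih =>
    rw [pvAllNE_cons] at h
    split at h
    · exact absurd h (by simp)
    · rename_i hx
      rw [pvTrailC_cons, if_pos ⟨hx, h⟩]
      simp

theorem pvAfterRun_nil_iff : ∀ l : List (List Int), pvAfterRun l = [] ↔ pvAllNE l = true := by
  intro l
  induction l with
  | nil => simp [pvAfterRun, pvAllNE]
  | cons x xs ih =>
    rw [pvAllNE_cons]
    unfold pvAfterRun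
    by_cases hx : x = [] <;> simp [hx, ih]

theorem pvRunHeads_afterRun_length : ∀ l : List (List Int),
    (pvRunHeads l).length + (pvAfterRun l).length = l.length := by
  intro l
  induction l with
  | nil => simp [pvRunHeads, pvAfterRun]
  | cons x xs ih =>
    unfold pvRunHeads pvAfterRun
    by_cases hx : x = [] <;> simp [hx]
    omega

theorem pvTrailC_afterRun : ∀ l : List (List Int), pvAfterRun l ≠ [] →
    pvTrailC (pvAfterRun l) = pvTrailC l := by
  intro l
  induction l with
  | nil => intro h; simp [pvAfterRun] at h
  | cons x xs ih =>
    intro h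
    unfold pvAfterRun at h ⊢
    by_cases hx : x = []
    · simp [hx]
    · rw [if_neg hx] at h ⊢
      have hne : pvAllNE xs ≠ true := by
        intro hall
        exact h ((pvAfterRun_nil_iff xs).mpr hall)
      rw [pvTrailC_cons, if_neg (by tauto)]
      exact ih h

theorem pvRunHeads_emitIn : ∀ (xs : List (List Int)) (j : Int),
    pvRunHeads xs ++ pvEmit (pvRunsB (pvAfterRun xs) (j + (pvRunHeads xs).length)) = pvEmitIn xs j := by
  intro xs
  induction xs with
  | nil => intro j; simp [pvRunHeads, pvAfterRun, pvRunsB, pvEmit, pvEmitIn]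
  | cons y ys ih =>
    intro j
    by_cases hy : y = []
    · simp only [pvRunHeads, pvAfterRun, if_pos hy, pvEmitIn_cons]
      simp only [List.nil_append, List.length_nil, Nat.cast_zero, add_zero]
      rw [pvRunsB, if_pos hy]
    · simp only [pvRunHeads, pvAfterRun, pvEmitIn_cons]
      rw [if_neg hy, if_neg hy, if_neg hy]
      have := ih (j + 1)
      simp only [List.length_cons, List.cons_append]
      rw [show j + (((pvRunHeads ys).length + 1 : Nat) : Int) = (j + 1) + (pvRunHeads ys).length by
        push_cast; ring]
      rw [this]

theorem pvEmit_runsB_cons_ne (x : List Int) (xs : List (List Int)) (i : Int) (hx : x ≠ []) :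
    pvEmit (pvRunsB (x :: xs) i) = i :: x.headD 0 :: pvEmitIn xs (i+1) := by
  rw [pvRunsB, if_neg hx]
  unfold pvEmit
  rw [List.flatMap_cons]
  simp only [List.cons_append]
  have := pvRunHeads_emitIn xs (i + 1)
  unfold pvEmit at this
  rw [show i + 1 + ((pvRunHeads xs).length : Int) = (i + 1) + (pvRunHeads xs).length by ring]
  rw [this]

theorem pvLoopA : ∀ (l : List (List Int)) (i c : Int) (acc : List Int), 0 ≤ c →
    (PySem.List.enumerate l i).foldl pvStepA (c, acc) =
      ((if pvAllNE l = true then c + (l.length : Int) else pvTrailC l),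
       acc ++ (if c = 0 then pvEmit (pvRunsB l i) else pvEmitIn l i)) := by
  intro l
  induction l with
  | nil =>
    intro i c acc _
    simp [PySem.List.enumerate_nil, pvAllNE, pvEmit, pvRunsB, pvEmitIn]
  | cons x xs ih =>
    intro i c acc hc
    rw [PySem.List.enumerate_cons, List.foldl_cons]
    by_cases hx : x = []
    · have hstep : pvStepA (c, acc) (i, x) = (0, acc) := by
        simp [pvStepA, hx]
      rw [hstep, ih (i+1) 0 acc (le_refl 0), Prod.mk.injEq]
      refine ⟨?_, ?_⟩
      · rw [show pvAllNE (x :: xs) = false by rw [pvAllNE_cons, if_pos hx]]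
        simp only [Bool.false_eq_true, if_false]
        conv_rhs => rw [pvTrailC_cons, if_neg (fun hcon => hcon.1 hx)]
        split
        · rename_i hall
          rw [pvAllNE_trailC xs hall]; simp
        · simp
      · rw [if_pos rfl]
        rw [show pvRunsB (x :: xs) i = pvRunsB xs (i+1) by rw [pvRunsB, if_pos hx]]
        rw [pvEmitIn_cons, if_pos hx]
        split <;> rfl
    · have hlen : 0 < x.length := List.length_pos_iff.mpr hx
      have hstep : pvStepA (c, acc) (i, x)
          = (c + 1, (if c = 0 then acc ++ [i] else acc) ++ [x.headD 0]) := by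
        simp [pvStepA, hlen]
      rw [hstep, ih (i+1) (c+1) _ (by omega), Prod.mk.injEq]
      have hc1 : (c + 1 : Int) ≠ 0 := by omega
      refine ⟨?_, ?_⟩
      · rw [show pvAllNE (x :: xs) = pvAllNE xs by rw [pvAllNE_cons, if_neg hx]]
        split
        · simp only [List.length_cons]; push_cast; ring
        · rename_i hall
          rw [pvTrailC_cons, if_neg (by tauto)]
      · rw [if_neg hc1]
        split
        · rename_i hc0
          rw [pvEmit_runsB_cons_ne x xs i hx]
          simp
        · rw [pvEmitIn_cons, if_neg hx]
          simp

theorem pvLastRun : ∀ (l : List (List Int)) (i : Int),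
    match (pvRunsB l i).getLast? with
    | none => pvTrailC l = 0
    | some (s, h) => pvTrailC l = (if s + (h.length : Int) = i + (l.length : Int) then (h.length : Int) else 0) := by
  intro l i
  induction l, i using pvRunsB.induct with
  | case1 i => simp [pvRunsB, pvTrailC]
  | case2 xs i ih =>
    rw [pvRunsB, if_pos rfl]
    rw [show pvTrailC ([] :: xs) = pvTrailC xs by rw [pvTrailC_cons, if_neg (by tauto)]]
    rcases hq : (pvRunsB xs (i+1)).getLast? with _ | ⟨s, h⟩
    · rw [hq] at ih; exact ih
    · rw [hq] at ih
      simp only []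
      rw [ih]
      rw [show (i+1) + (xs.length : Int) = i + ((([] : List Int) :: xs).length : Int) by
        simp only [List.length_cons]; push_cast; ring]
  | case3 x xs i hx ih =>
    rw [pvRunsB, if_neg hx]
    rcases hrest : pvRunsB (pvAfterRun xs) (i + 1 + (pvRunHeads xs).length) with _ | ⟨p, rest'⟩
    · -- the run opened here is the last one
      rw [hrest] at ih
      simp only [List.getLast?_nil] at ih
      simp only [List.getLast?_singleton]
      by_cases hafter : pvAfterRun xs = []
      · have hall : pvAllNE xs = true := (pvAfterRun_nil_iff xs).mp hafter
        have hlen : (pvRunHeads xs).length = xs.length := by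
          have := pvRunHeads_afterRun_length xs
          rw [hafter] at this; simpa using this
        rw [show pvTrailC (x :: xs) = (xs.length : Int) + 1 by
          rw [pvTrailC_cons, if_pos ⟨hx, hall⟩]]
        rw [if_pos (by simp only [List.length_cons]; push_cast [hlen]; ring)]
        simp only [List.length_cons]; push_cast [hlen]; ring
      · have h1 : pvTrailC (x :: xs) = pvTrailC xs := by
          rw [pvTrailC_cons, if_neg (by
            intro ⟨_, hall⟩
            exact hafter ((pvAfterRun_nil_iff xs).mpr hall))]
        have h2 : pvTrailC xs = pvTrailC (pvAfterRun xs) := (pvTrailC_afterRun xs hafter).symm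
        have hk : (pvRunHeads xs).length < xs.length := by
          have hl1 := pvRunHeads_afterRun_length xs
          have hl2 : 0 < (pvAfterRun xs).length := List.length_pos_iff.mpr hafter
          omega
        rw [h1, h2, ih]
        rw [if_neg (by simp only [List.length_cons]; push_cast; omega)]
    · -- the last run lies further on
      rw [hrest] at ih
      rw [List.getLast?_cons_cons]
      have hafter : pvAfterRun xs ≠ [] := by
        intro hnil
        rw [hnil] at hrest
        simp [pvRunsB] at hrest
      have h1 : pvTrailC (x :: xs) = pvTrailC (pvAfterRun xs) := by
        rw [pvTrailC_cons, if_neg (by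
          intro ⟨_, hall⟩
          exact hafter ((pvAfterRun_nil_iff xs).mpr hall))]
        exact (pvTrailC_afterRun xs hafter).symm
      rcases hq : (p :: rest').getLast? with _ | ⟨s, h⟩
      · simp at hq
      · rw [hq] at ih
        simp only []
        rw [h1, ih]
        have hlen := pvRunHeads_afterRun_length xs
        rw [show i + 1 + ((pvRunHeads xs).length : Int) + ((pvAfterRun xs).length : Int)
              = i + (((x :: xs)).length : Int) by simp only [List.length_cons]; push_cast; omega]

-- ===== VERDICT (by name: the statement is the Claim_ definition above) =====
theorem checkOddCycle_spec : Claim_equal_checkOddCycle := by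
  intro l _
  unfold Spec_checkOddCycle checkOddCycle checkOddCycle_alt
  rw [pvLoopA l 0 0 [] (le_refl 0)]
  simp only [List.nil_append]
  have hfst : (if pvAllNE l = true then (0:Int) + (l.length : Int) else pvTrailC l) = pvTrailC l := by
    split
    · rename_i hall; rw [pvAllNE_trailC l hall]; ring
    · rfl
  rw [hfst]
  have hfold : (pvRunsB l 0).foldl (fun acc (p : Int × List Int) => acc ++ p.1 :: p.2) ([] : List Int)
      = pvEmit (pvRunsB l 0) := by
    rw [PySem.List.foldl_append_eq_flatMap]
    simp [pvEmit]
  have hlast := pvLastRun l 0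
  rcases hq : (pvRunsB l 0).getLast? with _ | ⟨s, h⟩
  · rw [hq] at hlast
    simp only []
    rw [hlast]
    norm_num
  · rw [hq] at hlast
    simp only [] at hlast ⊢
    rw [hfold]
    by_cases heq : s + (h.length : Int) = (l.length : Int)
    · rw [if_pos (by omega)] at hlast
      rw [hlast]
      by_cases hodd : h.length % 2 = 1
      · rw [if_pos (show ((h.length : Int)) % 2 ≠ 0 by omega)]
        simp [heq, hodd]
      · rw [if_neg (show ¬(((h.length : Int)) % 2 ≠ 0) by omega)]
        simp [hodd]
    · rw [if_neg (by omega)] at hlast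
      rw [hlast]
      rw [if_neg (show ¬(((0 : Int)) % 2 ≠ 0) by norm_num)]
      rw [if_neg (fun hand => heq hand.1)]
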